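-- pv_equiv track=rewrite | github.com/nathanaelcheramlak/A2SV-Inperson | 28-Oct-2025/Divisibility by 2^n 406215.py | multiple_counter
-- ===== SOURCE A (Python) =====
-- def multiple_counter(n):
--     multiple_count = {1: 0}
--     for i in range(2, n + 1, 2):
--         count = 0
--         temp = i
--         while temp > 1:
--             if temp & 1:
--                 break
--             if temp in multiple_count:
--                 count += multiple_count[temp]
--                 break
--             count += 1
--             temp //= 2
--
--         multiple_count[i] = count
--
--     return dict(sorted(multiple_count.items(), key=lambda x: x[1], reverse=True))
-- ===== SOURCE B (Python) =====
-- def multiple_counter(n):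
--     # Bucket by the exponent of 2: for each exponent e from the largest
--     # possible down to 1, the even numbers i <= n with v2(i) == e are exactly
--     # p, 3p, 5p, ... for p = 2**e, already in ascending order -- which is
--     # precisely the stable descending-by-count order the original produces.
--     # O(n) total: no per-number division loop and no sort.
--     pairs = []
--     if n >= 2:
--         for e in range(n.bit_length() - 1, 0, -1):
--             p = 2 ** e
--             pairs += [(m, e) for m in range(p, n + 1, 2 * p)]
--     pairs.append((1, 0))
--     return dict(pairs)
-- ===== Notes on version B (the rewrite author's own statement) =====
-- stated objective: faster
-- what changed: Replaces the per-number halving loop with memo dict plus the final stable sort by an O(n) bucket emission: for each exponent e from the largest down to 1 it directly enumerates the evens with 2-adic valuation e (p, 3p, 5p, ... for p = 2**e), which is already the stable descending-by-count order, so no sort is needed.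
import Mathlib
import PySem

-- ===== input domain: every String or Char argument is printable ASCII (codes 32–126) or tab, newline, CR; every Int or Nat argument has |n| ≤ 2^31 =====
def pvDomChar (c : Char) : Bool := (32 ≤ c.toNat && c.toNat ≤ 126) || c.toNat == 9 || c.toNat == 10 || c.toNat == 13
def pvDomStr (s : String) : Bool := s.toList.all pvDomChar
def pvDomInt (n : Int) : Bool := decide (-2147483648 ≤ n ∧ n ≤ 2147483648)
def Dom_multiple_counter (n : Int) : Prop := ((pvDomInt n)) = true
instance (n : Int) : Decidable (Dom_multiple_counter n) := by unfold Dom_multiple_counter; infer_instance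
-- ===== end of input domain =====

-- B replaces A's per-number halving loop + memo dict + stable sort by a direct
-- high-to-low bucket emission of the evens by 2-adic valuation (O(n), no sort).

-- ===== PORT A =====
-- the inner `while temp > 1: ...` loop of A (break on odd temp, memo hit, or temp = 1)
def pvWhileA (d : PySem.Dict Int Int) (temp count : Int) : Int :=
  if h : 1 < temp then
    if PySem.Int.band temp 1 ≠ 0 then count
    else if d.contains temp then count + d.getD temp 0
    else pvWhileA d (PySem.Int.floordiv temp 2) (count + 1)
  else count
termination_by temp.toNat
decreasing_by
  rw [PySem.Int.floordiv_eq_ediv_of_pos (by omega : (0:Int) < 2)]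
  omega

def multiple_counter (n : Int) : List (Int × Int) :=
  let d := (PySem.List.pyRange 2 (n + 1) 2).foldl
    (fun d i => d.insert i (pvWhileA d i 0))
    (PySem.Dict.ofList [(1, 0)])
  (PySem.Dict.ofList (PySem.List.sorted d.items (fun p => p.2) true)).items

-- ===== PORT B =====
def multiple_counter_alt (n : Int) : List (Int × Int) :=
  let pairs : List (Int × Int) :=
    (if 2 ≤ n then
      (PySem.List.pyRange ((PySem.Int.bitLength n : Int) - 1) 0 (-1)).foldl
        (fun acc e =>
          -- p = 2 ** e; every e produced by the range satisfies 1 ≤ e, so .toNat is exact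
          let p : Int := (2 : Int) ^ e.toNat
          acc ++ (PySem.List.pyRange p (n + 1) (2 * p)).map (fun m => (m, e)))
        []
    else []) ++ [(1, 0)]
  (PySem.Dict.ofList pairs).items

-- ===== PRECONDITION & SPEC =====
def Spec_multiple_counter (n : Int) (out : List (Int × Int)) : Prop := out = multiple_counter_alt n
instance (n : Int) (out : List (Int × Int)) : Decidable (Spec_multiple_counter n out) := by unfold Spec_multiple_counter; infer_instance

-- ===== CLAIM (what is proved, stated in full; the proofs are below) =====
def Claim_equal_multiple_counter : Prop := ∀ (n : Int), Dom_multiple_counter n → Spec_multiple_counter n (multiple_counter n)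

-- ===== LEMMAS AND PROOFS =====

-- 2-adic valuation on Nat (proof-side helper only)
def pvV2 (m : Nat) : Nat :=
  if h : m % 2 = 0 ∧ m ≠ 0 then pvV2 (m / 2) + 1 else 0
termination_by m
decreasing_by omega

lemma pvV2_odd (m : Nat) (h : m % 2 = 1) : pvV2 m = 0 := by
  rw [pvV2]; simp [h]

lemma pvV2_even (m : Nat) (h : m % 2 = 0) (h0 : m ≠ 0) : pvV2 m = pvV2 (m / 2) + 1 := by
  rw [pvV2]; simp [h, h0]

lemma pvV2_mul_odd (e k : Nat) : pvV2 (2 ^ e * (2 * k + 1)) = e := by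
  induction e with
  | zero => simpa using pvV2_odd _ (by omega)
  | succ e ih =>
      have hrw : 2 ^ (e + 1) * (2 * k + 1) = 2 * (2 ^ e * (2 * k + 1)) := by ring
      rw [hrw, pvV2_even _ (by omega) (by positivity)]
      have hdiv : 2 * (2 ^ e * (2 * k + 1)) / 2 = 2 ^ e * (2 * k + 1) := by omega
      rw [hdiv, ih]

lemma pvV2_spec (m : Nat) (h : m ≠ 0) : ∃ k, m = 2 ^ pvV2 m * (2 * k + 1) := by
  induction m using Nat.strong_induction_on with
  | _ m ih =>
    rcases Nat.even_or_odd m with he | ho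
    · have h2 : m % 2 = 0 := Nat.even_iff.mp he
      obtain ⟨k, hk⟩ := ih (m / 2) (by omega) (by omega)
      refine ⟨k, ?_⟩
      rw [pvV2_even m h2 h, pow_succ]
      calc m = 2 * (m / 2) := by omega
        _ = 2 * (2 ^ pvV2 (m / 2) * (2 * k + 1)) := by conv_lhs => rw [hk]
        _ = 2 ^ pvV2 (m / 2) * 2 * (2 * k + 1) := by ring
    · have h1 := Nat.odd_iff.mp ho
      exact ⟨m / 2, by rw [pvV2_odd m h1, pow_zero]; omega⟩

lemma pvV2_pos_of_even (m : Nat) (h : m % 2 = 0) (h0 : m ≠ 0) : 1 ≤ pvV2 m := by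
  rw [pvV2_even m h h0]; omega

lemma pvV2_le (m : Nat) : 2 ^ pvV2 m ≤ m ∨ m = 0 := by
  by_cases h : m = 0
  · exact Or.inr h
  · obtain ⟨k, hk⟩ := pvV2_spec m h
    exact Or.inl (by nlinarith [Nat.pos_of_ne_zero h, pow_pos (by omega : 0 < 2) (pvV2 m)])

-- insertBy helpers
lemma insertBy_append_not {α : Type} (before : α → α → Bool) (x : α) (ys zs : List α)
    (h : ∀ y ∈ ys, before x y = false) :
    PySem.List.insertBy before x (ys ++ zs) = ys ++ PySem.List.insertBy before x zs := by
  induction ys with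
  | nil => simp
  | cons y t ih =>
      have hy : before x y = false := h y (by simp)
      simp only [List.cons_append, PySem.List.insertBy, hy]
      simp only [Bool.false_eq_true, if_false]
      rw [ih (fun y hy => h y (by simp [hy]))]

lemma insertBy_all_before {α : Type} (before : α → α → Bool) (x : α) (l : List α)
    (h : ∀ y ∈ l, before x y = true) :
    PySem.List.insertBy before x l = x :: l := by
  cases l with
  | nil => rfl
  | cons y t => simp [PySem.List.insertBy, h y (by simp)]

-- stable descending sort of a list whose keys all lie in a strictly decreasing
-- list ks is the concatenation of the key groups in ks-order
lemma insertBy_flatMap (x : Int × Int) (L : List (Int × Int)) (ks : List Int)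
    (hks : ks.Pairwise (fun a b => b < a)) (hx : x.2 ∈ ks) :
    PySem.List.insertBy (fun a b => decide (b.2 < a.2)) x
        (ks.flatMap (fun k => L.filter (fun p => p.2 = k)))
      = ks.flatMap (fun k => (L ++ [x]).filter (fun p => p.2 = k)) := by
  induction ks with
  | nil => simp at hx
  | cons k ks ih =>
      have hlt : ∀ k' ∈ ks, k' < k := fun k' h => (List.pairwise_cons.mp hks).1 k' h
      simp only [List.flatMap_cons]
      by_cases hxk : x.2 = k
      · have h1 : ∀ y ∈ L.filter (fun p => p.2 = k), (decide (y.2 < x.2) : Bool) = false := by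
          intro y hy
          have : y.2 = k := by simpa using (List.mem_filter.mp hy).2
          simp [this, hxk]
        rw [insertBy_append_not _ _ _ _ h1]
        have h2 : PySem.List.insertBy (fun a b => decide (b.2 < a.2)) x
            (ks.flatMap (fun k => L.filter (fun p => p.2 = k)))
            = x :: ks.flatMap (fun k => L.filter (fun p => p.2 = k)) := by
          apply insertBy_all_before
          intro y hy
          obtain ⟨k', hk', hy'⟩ := List.mem_flatMap.mp hy
          have : y.2 = k' := by simpa using (List.mem_filter.mp hy').2
          simp [this, hxk]
          exact hlt k' hk'
        rw [h2]
        have h3 : (L ++ [x]).filter (fun p => p.2 = k) = L.filter (fun p => p.2 = k) ++ [x] := by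
          simp [List.filter_append, hxk]
        have h4 : ks.flatMap (fun k' => (L ++ [x]).filter (fun p => p.2 = k'))
            = ks.flatMap (fun k' => L.filter (fun p => p.2 = k')) := by
          apply List.flatMap_congr
          intro k' hk'
          have hne : x.2 ≠ k' := by have := hlt k' hk'; omega
          simp [List.filter_append, hne]
        rw [h3, h4, List.append_assoc]
        rfl
      · have hx' : x.2 ∈ ks := by
          rcases List.mem_cons.mp hx with h | h
          · exact absurd h hxk
          · exact h
        have hxlt : x.2 < k := hlt _ hx'
        have h1 : ∀ y ∈ L.filter (fun p => p.2 = k), (decide (y.2 < x.2) : Bool) = false := by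
          intro y hy
          have : y.2 = k := by simpa using (List.mem_filter.mp hy).2
          simp [this]; omega
        rw [insertBy_append_not _ _ _ _ h1, ih (List.pairwise_cons.mp hks).2 hx']
        have h3 : (L ++ [x]).filter (fun p => p.2 = k) = L.filter (fun p => p.2 = k) := by
          simp [List.filter_append, hxk]
        rw [h3]

lemma sorted_rev_flatMap (L : List (Int × Int)) (ks : List Int)
    (hks : ks.Pairwise (fun a b => b < a)) (hmem : ∀ x ∈ L, x.2 ∈ ks) :
    PySem.List.sorted L (fun p => p.2) true
      = ks.flatMap (fun k => L.filter (fun p => p.2 = k)) := by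
  induction L using List.reverseRecOn with
  | nil =>
      rw [PySem.List.sorted_rev_eq_foldl_insertBy]
      simp
  | append_singleton L x ih =>
      rw [PySem.List.sorted_rev_eq_foldl_insertBy, List.foldl_append, List.foldl_cons,
        List.foldl_nil, ← PySem.List.sorted_rev_eq_foldl_insertBy]
      rw [ih (fun y hy => hmem y (by simp [hy]))]
      exact insertBy_flatMap x L ks hks (hmem x (by simp))

-- strictly increasing lists with the same members are equal
lemma eq_of_pairwise_lt_of_mem (l1 l2 : List Int)
    (h1 : l1.Pairwise (· < ·)) (h2 : l2.Pairwise (· < ·))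
    (hm : ∀ x, x ∈ l1 ↔ x ∈ l2) : l1 = l2 := by
  have hn1 : l1.Nodup := h1.imp (fun h => ne_of_lt h)
  have hn2 : l2.Nodup := h2.imp (fun h => ne_of_lt h)
  have hp : l1.Perm l2 := (List.perm_ext_iff_of_nodup hn1 hn2).mpr hm
  exact List.Perm.eq_of_pairwise (fun a b _ _ hab hba => by omega)
    (h1.imp le_of_lt) (h2.imp le_of_lt) hp

lemma pairwise_lt_pyRange_pos (a b s : Int) (hs : 0 < s) :
    (PySem.List.pyRange a b s).Pairwise (· < ·) := by
  rw [PySem.List.pyRange_of_pos a b hs]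
  refine List.Pairwise.map _ ?_ List.pairwise_lt_range
  intro j k hjk
  have : (j : Int) < k := by exact_mod_cast hjk
  nlinarith

-- the key arithmetic fact: evens ≤ n with valuation e are pyRange (2^e) (n+1) (2·2^e)
lemma filter_evens (n : Int) (e : Nat) (he : 1 ≤ e) :
    (PySem.List.pyRange 2 (n + 1) 2).filter
        (fun i => decide ((pvV2 i.toNat : Int) = (e : Int)))
      = PySem.List.pyRange ((2 : Int) ^ e) (n + 1) (2 * 2 ^ e) := by
  apply eq_of_pairwise_lt_of_mem
  · exact (pairwise_lt_pyRange_pos 2 (n+1) 2 (by omega)).sublist List.filter_sublist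
  · exact pairwise_lt_pyRange_pos _ _ _ (by positivity)
  · intro x
    rw [List.mem_filter, PySem.List.mem_pyRange_iff_of_pos (by omega : (0:Int) < 2),
      PySem.List.mem_pyRange_iff_of_pos (by positivity : (0:Int) < 2 * 2 ^ e)]
    constructor
    · rintro ⟨⟨h2, hn, hd⟩, hv⟩
      have hv' : pvV2 x.toNat = e := by exact_mod_cast of_decide_eq_true hv
      obtain ⟨k, hk⟩ := pvV2_spec x.toNat (by omega)
      rw [hv'] at hk
      have hx : x = (2 : Int) ^ e * (2 * k + 1) := by
        have h' := congrArg (fun m : Nat => (m : Int)) hk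
        push_cast at h'; omega
      refine ⟨?_, hn, ⟨k, ?_⟩⟩
      · nlinarith [pow_pos (by omega : (0:Int) < 2) e]
      · rw [hx]; ring
    · rintro ⟨hge, hn, ⟨k, hk⟩⟩
      have hpe : (0:Int) < 2 ^ e := pow_pos (by omega) e
      have hk0 : 0 ≤ k := by nlinarith
      have hx : x = (2:Int) ^ e * (2 * k + 1) := by linarith [hk]
      have h2e : (2:Int) ≤ 2 ^ e := by
        calc (2:Int) = 2 ^ 1 := by ring
        _ ≤ 2 ^ e := pow_le_pow_right₀ (by omega) he
      have h2x : 2 ≤ x := by nlinarith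
      refine ⟨⟨h2x, hn, ?_⟩, ?_⟩
      · -- x even, so 2 ∣ x - 2
        obtain ⟨c, hc⟩ : (2:Int) ∣ x := by
          rw [hx]
          exact Dvd.dvd.mul_right (dvd_pow_self 2 (by omega : e ≠ 0)) _
        omega
      · have hN : x = ((2 ^ e * (2 * k.toNat + 1) : Nat) : Int) := by
          push_cast
          rw [Int.toNat_of_nonneg hk0]
          linarith [hx]
        have hxt : x.toNat = 2 ^ e * (2 * k.toNat + 1) := by omega
        rw [hxt, pvV2_mul_odd]
        simp

-- correctness of A's inner while loop under the memo invariant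
lemma while_spec (d : PySem.Dict Int Int)
    (hd : ∀ k v, (k, v) ∈ d.items → v = (pvV2 k.toNat : Int)) (hnd : d.keys.Nodup) :
    ∀ (temp count : Int), 0 < temp → pvWhileA d temp count = count + (pvV2 temp.toNat : Int) := by
  suffices H : ∀ (N : Nat) (temp count : Int), 0 < temp → temp.toNat ≤ N →
      pvWhileA d temp count = count + (pvV2 temp.toNat : Int) by
    intro temp count h; exact H temp.toNat temp count h le_rfl
  intro N
  induction N with
  | zero => intro temp count h hle; omega
  | succ N ihN =>
    intro temp count h hle
    rw [pvWhileA]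
    split_ifs with h1 h2 h3
    · -- temp odd: v2 = 0
      have hb : PySem.Int.band temp 1 = PySem.Int.mod temp 2 := PySem.Int.band_one temp
      have hm : PySem.Int.mod temp 2 = temp % 2 := PySem.Int.mod_eq_emod_of_pos (by omega)
      rw [hb, hm] at h2
      have hodd : temp.toNat % 2 = 1 := by omega
      rw [pvV2_odd _ hodd]
      simp
    · -- memo hit
      obtain ⟨p, hp, hp1⟩ : ∃ p ∈ d.items, p.1 = temp := by
        have hmem := (PySem.Dict.contains_iff_mem_keys d temp).mp h3
        simpa [PySem.Dict.keys] using hmem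
      have hv := hd p.1 p.2 (by simpa using hp)
      have hg : d.getD temp 0 = p.2 := by
        rw [← hp1]
        exact PySem.Dict.getD_of_mem_items d (by simpa using hp) hnd 0
      rw [hg, hv, hp1]
    · -- recurse on temp // 2
      have hb : PySem.Int.band temp 1 = PySem.Int.mod temp 2 := PySem.Int.band_one temp
      have hm : PySem.Int.mod temp 2 = temp % 2 := PySem.Int.mod_eq_emod_of_pos (by omega)
      rw [hb, hm] at h2
      have heven : temp % 2 = 0 := by omega
      have hfd : PySem.Int.floordiv temp 2 = temp / 2 :=
        PySem.Int.floordiv_eq_ediv_of_pos (by omega)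
      rw [hfd, ihN (temp / 2) (count + 1) (by omega) (by omega)]
      have hrec : pvV2 temp.toNat = pvV2 (temp.toNat / 2) + 1 :=
        pvV2_even _ (by omega) (by omega)
      have ht2 : (temp / 2).toNat = temp.toNat / 2 := by omega
      rw [ht2, hrec]
      push_cast
      ring
    · -- temp = 1
      have h1' : temp = 1 := by omega
      subst h1'
      rw [show (1:Int).toNat = 1 from rfl, pvV2_odd 1 (by norm_num)]
      simp

-- shape of A's memo dict: fresh even keys are appended with their valuation
lemma fold_items_aux (c : Nat) :
    (((List.range c).map (fun k : Nat => 2 + 2 * (k : Int))).foldl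
        (fun d i => d.insert i (pvWhileA d i 0)) (PySem.Dict.ofList [(1, 0)])).items
      = (1, 0) :: ((List.range c).map (fun k : Nat => 2 + 2 * (k : Int))).map
          (fun i => (i, (pvV2 i.toNat : Int))) := by
  induction c with
  | zero => rfl
  | succ c ih =>
      rw [List.range_succ, List.map_append, List.foldl_append]
      set D := ((List.range c).map (fun k : Nat => 2 + 2 * (k : Int))).foldl
        (fun d i => d.insert i (pvWhileA d i 0)) (PySem.Dict.ofList [(1, 0)]) with hD
      set i : Int := 2 + 2 * (c : Int) with hi
      have hkeys : PySem.Dict.keys D = 1 :: (List.range c).map (fun k : Nat => 2 + 2 * (k : Int)) := by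
        simp [PySem.Dict.keys, ih]
      have hnd : D.keys.Nodup := by
        rw [hkeys]
        refine List.nodup_cons.mpr ⟨?_, ?_⟩
        · intro hmem
          obtain ⟨k, _, hk⟩ := List.mem_map.mp hmem
          omega
        · refine List.Nodup.map ?_ List.nodup_range
          intro a b hab
          have : 2 + 2 * (a : Int) = 2 + 2 * (b : Int) := hab
          omega
      have hcont : D.contains i = false := by
        by_contra hc
        have hc' : D.contains i = true := by
          cases hh : D.contains i
          · exact absurd hh hc
          · rfl
        have := (PySem.Dict.contains_iff_mem_keys D i).mp hc'
        rw [hkeys] at this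
        rcases List.mem_cons.mp this with h | h
        · omega
        · obtain ⟨k, hk, hk2⟩ := List.mem_map.mp h
          have : k < c := List.mem_range.mp hk
          omega
      have hdv : ∀ k v, (k, v) ∈ D.items → v = (pvV2 k.toNat : Int) := by
        intro k v hkv
        rw [ih] at hkv
        rcases List.mem_cons.mp hkv with h | h
        · obtain ⟨hk1, hv1⟩ : k = 1 ∧ v = 0 := by simpa using h
          rw [hk1, hv1, show (1:Int).toNat = 1 from rfl, pvV2_odd 1 (by norm_num)]
          norm_num
        · obtain ⟨j, _, hj⟩ := List.mem_map.mp h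
          obtain ⟨h1, h2⟩ : j = k ∧ (pvV2 j.toNat : Int) = v := by
            simpa [Prod.ext_iff] using hj
          subst h1
          exact h2.symm
      simp only [List.map_cons, List.map_nil, List.foldl_cons, List.foldl_nil]
      rw [PySem.Dict.items_insert_of_not_contains D _ hcont, ih,
        while_spec D hdv hnd i 0 (by omega)]
      simp
      exact ⟨rfl, rfl⟩

lemma fold_items (n : Int) :
    ((PySem.List.pyRange 2 (n + 1) 2).foldl
        (fun d i => d.insert i (pvWhileA d i 0)) (PySem.Dict.ofList [(1, 0)])).items
      = (1, 0) :: (PySem.List.pyRange 2 (n + 1) 2).map (fun i => (i, (pvV2 i.toNat : Int))) := by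
  rw [PySem.List.pyRange_of_pos 2 (n + 1) (by omega)]
  have : (fun k : Nat => (2 : Int) + 2 * (k : Int)) = (fun k : Nat => 2 + 2 * (k : Int)) := rfl
  exact fold_items_aux _

-- bitLength bound: every even 2 ≤ i ≤ n has valuation ≤ bitLength n - 1
lemma v2_le_bitLength (n i : Int) (h2 : 2 ≤ i) (hn : i ≤ n) :
    (pvV2 i.toNat : Int) ≤ (PySem.Int.bitLength n : Int) - 1 := by
  have h1 : 2 ^ pvV2 i.toNat ≤ i.toNat := by
    rcases pvV2_le i.toNat with h | h
    · exact h
    · omega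
  have h2' : i.toNat ≤ n.natAbs := by omega
  have h3 := PySem.Int.lt_two_pow_bitLength n
  have h4 : (2:Nat) ^ pvV2 i.toNat < 2 ^ PySem.Int.bitLength n := by omega
  have h5 := (Nat.pow_lt_pow_iff_right (by omega : 1 < 2)).mp h4
  omega

lemma bitLength_ge_two (n : Int) (hn : 2 ≤ n) : 2 ≤ PySem.Int.bitLength n := by
  by_contra hb
  have h3 := PySem.Int.lt_two_pow_bitLength n
  interval_cases h : PySem.Int.bitLength n <;> omega

-- splitting the countdown range at 0
lemma pyRange_countdown_split (e0 : Int) (h : 0 ≤ e0) :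
    PySem.List.pyRange e0 (-1) (-1) = PySem.List.pyRange e0 0 (-1) ++ [0] := by
  rw [PySem.List.pyRange_neg_one_eq_reverse, PySem.List.pyRange_neg_one_eq_reverse,
    show (-1 : Int) + 1 = 0 by ring,
    PySem.List.pyRange_one_cons (by omega : (0:Int) < e0 + 1)]
  simp

-- ===== VERDICT (by name: the statement is the Claim_ definition above) =====
theorem multiple_counter_spec : Claim_equal_multiple_counter := by
  intro n _
  unfold Spec_multiple_counter multiple_counter multiple_counter_alt
  simp only []
  rw [fold_items n]
  by_cases hn : 2 ≤ n
  case neg =>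
    -- no evens at all: both sides are [(1, 0)]
    have hE : PySem.List.pyRange 2 (n + 1) 2 = [] := by
      rw [PySem.List.pyRange_of_pos 2 (n + 1) (by omega)]
      simp [show ¬(2 < n + 1) by omega]
    rw [hE]
    simp only [List.map_nil, if_neg hn, List.nil_append]
    have hs : PySem.List.sorted [((1:Int), (0:Int))] (fun p => p.2) true = [(1, 0)] := by
      rw [PySem.List.sorted_rev_eq_foldl_insertBy]
      simp only [List.foldl_cons, List.foldl_nil]
      exact insertBy_all_before _ _ [] (by simp)
    rw [hs]
  case pos =>
    set e0 : Int := (PySem.Int.bitLength n : Int) - 1 with he0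
    have hbl2 := bitLength_ge_two n hn
    have he0pos : 1 ≤ e0 := by omega
    set E := PySem.List.pyRange 2 (n + 1) 2 with hE
    set L : List (Int × Int) := (1, 0) :: E.map (fun i => (i, (pvV2 i.toNat : Int))) with hL
    have hEmem : ∀ i ∈ E, 2 ≤ i ∧ i < n + 1 ∧ (2:Int) ∣ i - 2 := by
      intro i hi
      exact (PySem.List.mem_pyRange_iff_of_pos (by omega) i).mp hi
    -- every key of L lies in the countdown list ks
    set ks : List Int := PySem.List.pyRange e0 (-1) (-1) with hks
    have hkspw : ks.Pairwise (fun a b => b < a) := by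
      rw [hks, PySem.List.pyRange_neg_one_eq_reverse, List.pairwise_reverse]
      exact (pairwise_lt_pyRange_pos _ _ 1 (by omega)).imp id
    have hmem : ∀ x ∈ L, x.2 ∈ ks := by
      intro x hx
      rw [hks, PySem.List.mem_pyRange_neg_one]
      rcases List.mem_cons.mp hx with h | h
      · rw [h]; constructor <;> omega
      · obtain ⟨i, hi, hix⟩ := List.mem_map.mp h
        obtain ⟨h2, hn', hdvd⟩ := hEmem i hi
        have hv1 : 1 ≤ pvV2 i.toNat := pvV2_pos_of_even i.toNat (by omega) (by omega)
        have hv2 := v2_le_bitLength n i h2 (by omega)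
        rw [← hix]
        simp only
        constructor <;> omega
    -- the stable descending sort is the bucket concatenation
    rw [sorted_rev_flatMap L ks hkspw hmem]
    rw [hks, pyRange_countdown_split e0 (by omega), List.flatMap_append]
    -- the 0-bucket is [(1, 0)]
    have hzero : List.flatMap (fun k => L.filter (fun p => p.2 = k)) [0] = [(1, 0)] := by
      simp only [List.flatMap_cons, List.flatMap_nil, List.append_nil, hL]
      rw [List.filter_cons]
      simp only [decide_eq_true_eq]
      have : (E.map (fun i => (i, (pvV2 i.toNat : Int)))).filter (fun p => p.2 = 0) = [] := by
        rw [List.filter_eq_nil_iff]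
        intro p hp
        obtain ⟨i, hi, hip⟩ := List.mem_map.mp hp
        obtain ⟨h2, _, hdvd⟩ := hEmem i hi
        have hv1 : 1 ≤ pvV2 i.toNat := pvV2_pos_of_even i.toNat (by omega) (by omega)
        rw [← hip]
        simp only [decide_eq_true_eq]
        omega
      rw [this]
      simp
  -- the e-bucket of L is B's e-bucket
    have hbucket : ∀ e ∈ PySem.List.pyRange e0 0 (-1),
        L.filter (fun p => p.2 = e)
          = (PySem.List.pyRange ((2:Int) ^ e.toNat) (n + 1) (2 * (2:Int) ^ e.toNat)).map
              (fun m => (m, e)) := by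
      intro e hee
      have hrange := PySem.List.mem_pyRange_neg_one.mp hee
      have he1 : 1 ≤ e := by omega
      rw [hL]
      rw [List.filter_cons]
      simp only [decide_eq_true_eq, if_neg (by omega : ¬((1:Int), (0:Int)).2 = e)]
      rw [List.filter_map]
      have hpred : ((fun p : Int × Int => decide (p.2 = e)) ∘ (fun i => (i, (pvV2 i.toNat : Int))))
          = fun i => decide ((pvV2 i.toNat : Int) = ((e.toNat : Nat) : Int)) := by
        funext i
        simp only [Function.comp_apply, decide_eq_decide]
        constructor
        · intro hh; omega
        · intro hh; omega
      rw [hpred, hE, filter_evens n e.toNat (by omega)]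
      apply List.map_congr_left
      intro m hm
      obtain ⟨hge, _, _⟩ := (PySem.List.mem_pyRange_iff_of_pos (by positivity) m).mp hm
      have : pvV2 m.toNat = e.toNat := by
        have := filter_evens n e.toNat (by omega)
        have hm' : m ∈ (PySem.List.pyRange 2 (n + 1) 2).filter
            (fun i => decide ((pvV2 i.toNat : Int) = (e.toNat : Int))) := by
          rw [this]; exact hm
        have := (List.mem_filter.mp hm').2
        simp only [decide_eq_true_eq] at this
        exact_mod_cast this
      rw [this]
      simp only [Prod.mk.injEq, true_and]
      omega
    -- B's pair list, as a flatMap; after that both sides rebuild the same dict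
    rw [if_pos hn, PySem.List.foldl_append_eq_flatMap, List.nil_append, hzero,
      List.flatMap_congr hbucket]
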